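-- pv_equiv track=rewrite | github.com/EirikAarrestad/PID-regulator | Oppgave.py | fill_vector_with_values
-- ===== SOURCE A (Python) =====
-- def fill_vector_with_values(vector_length, values):
--     num_segments = len(values)
--     segment_length = vector_length // num_segments
--
--     filled_vector = []
--
--     for value in values:
--         filled_vector.extend([value] * segment_length)
--
--     # Fill any remaining positions in case of rounding errors
--     remaining_length = vector_length - len(filled_vector)
--     filled_vector.extend([values[-1]] * (remaining_length + 1))
--
--     return filled_vector
-- ===== SOURCE B (Python) =====
-- def fill_vector_with_values(vector_length, values):
--     segment_length = vector_length // len(values)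
--     covered = len(values) * segment_length
--     return [values[i // segment_length] if i < covered else values[-1]
--             for i in range(vector_length + 1)]
-- ===== Notes on version B (the rewrite author's own statement) =====
-- stated objective: alternative
-- what changed: B builds the output in one comprehension over output positions, indexing values[i // segment_length] (with a tail fill of values[-1]), instead of A's extend-per-segment loop plus a separate remaining-length step.
import Mathlib
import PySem

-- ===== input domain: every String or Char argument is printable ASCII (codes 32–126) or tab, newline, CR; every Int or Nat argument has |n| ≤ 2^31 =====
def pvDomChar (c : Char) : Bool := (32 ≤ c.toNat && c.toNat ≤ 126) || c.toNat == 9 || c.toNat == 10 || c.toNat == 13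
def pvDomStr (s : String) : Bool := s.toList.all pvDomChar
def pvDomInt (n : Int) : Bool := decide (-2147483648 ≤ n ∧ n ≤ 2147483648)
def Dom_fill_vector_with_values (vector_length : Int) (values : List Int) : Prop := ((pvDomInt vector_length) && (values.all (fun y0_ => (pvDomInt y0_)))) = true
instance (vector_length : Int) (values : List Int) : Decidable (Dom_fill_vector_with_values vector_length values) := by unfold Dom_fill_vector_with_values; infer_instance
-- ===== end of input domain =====

-- B builds the output in one pass over output positions via values[i // segment_length],
-- instead of A's extend-per-segment loop plus a separate remaining-length fill (alternative, same cost).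

-- ===== PORT A =====
def fill_vector_with_values (vector_length : Int) (values : List Int) : List Int :=
  let num_segments : Int := values.length
  let segment_length : Int := PySem.Int.floordiv vector_length num_segments
  let filled_vector : List Int :=
    values.foldl (fun acc value => acc ++ PySem.List.pyRepeat [value] segment_length) []
  let remaining_length : Int := vector_length - filled_vector.length
  filled_vector ++ PySem.List.pyRepeat [PySem.List.pyGetD values (-1) 0] (remaining_length + 1)

-- ===== PORT B =====
def fill_vector_with_values_alt (vector_length : Int) (values : List Int) : List Int :=
  let segment_length : Int := PySem.Int.floordiv vector_length (values.length : Int)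
  let covered : Int := (values.length : Int) * segment_length
  (PySem.List.pyRange 0 (vector_length + 1)).map (fun i =>
    if i < covered then PySem.List.pyGetD values (PySem.Int.floordiv i segment_length) 0
    else PySem.List.pyGetD values (-1) 0)

-- ===== PRECONDITION & SPEC =====
-- Pre_ excludes only values = [], where Python A (and B) raise ZeroDivisionError.
def Pre_fill_vector_with_values (vector_length : Int) (values : List Int) : Prop := values ≠ []
instance (vector_length : Int) (values : List Int) : Decidable (Pre_fill_vector_with_values vector_length values) := by unfold Pre_fill_vector_with_values; infer_instance
def pvWitness_fill_vector_with_values : Int × List Int := (7, [1, 2, 3])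

def Spec_fill_vector_with_values (vector_length : Int) (values : List Int) (out : List Int) : Prop := out = fill_vector_with_values_alt vector_length values
instance (vector_length : Int) (values : List Int) (out : List Int) : Decidable (Spec_fill_vector_with_values vector_length values out) := by unfold Spec_fill_vector_with_values; infer_instance

-- ===== CLAIM (what is proved, stated in full; the proofs are below) =====
def Claim_equal_fill_vector_with_values : Prop := ∀ (vector_length : Int) (values : List Int), Dom_fill_vector_with_values vector_length values → Pre_fill_vector_with_values vector_length values → Spec_fill_vector_with_values vector_length values (fill_vector_with_values vector_length values)

-- ===== LEMMAS AND PROOFS =====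

-- flatMap of constant-length replicates, characterised by positions.
theorem pv_flatMap_replicate (k : Nat) (vs : List Int) :
    vs.flatMap (fun v => List.replicate k v)
      = (List.range (vs.length * k)).map (fun i => vs.getD (i / k) 0) := by
  induction vs with
  | nil => simp
  | cons v t ih =>
    rcases Nat.eq_zero_or_pos k with hk | hk
    · simp [hk]
    · have hlen : (v :: t).length * k = k + t.length * k := by
        simp [List.length_cons]; ring
      rw [List.flatMap_cons, hlen, List.range_add, List.map_append, List.map_map]
      congr 1
      · have h1 : ∀ i ∈ List.range k,
            (v :: t).getD (i / k) 0 = v := by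
          intro i hi
          rw [Nat.div_eq_of_lt (List.mem_range.mp hi)]; rfl
        rw [List.map_congr_left h1, List.map_const', List.length_range]
      · rw [ih]
        apply List.map_congr_left
        intro j _
        simp only [Function.comp_apply]
        have : (k + j) / k = j / k + 1 := by
          rw [Nat.add_comm, Nat.add_div_right _ hk]
        rw [this]; rfl

-- range-map over a const function is a replicate
theorem pv_map_range_const (r : Nat) (c : Int) :
    (List.range r).map (fun _ => c) = List.replicate r c := by
  rw [List.map_const', List.length_range]

theorem fill_vector_with_values_spec : Claim_equal_fill_vector_with_values := by
  unfold Claim_equal_fill_vector_with_values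
  intro vl values _ hpre
  unfold Spec_fill_vector_with_values
  unfold Pre_fill_vector_with_values at hpre
  unfold fill_vector_with_values fill_vector_with_values_alt
  simp only []
  set n : Nat := values.length with hnns
  have hn : 0 < n := List.length_pos_iff.mpr hpre
  set seg : Int := PySem.Int.floordiv vl (n : Int) with hseg
  have hmod1 : seg * (n : Int) + PySem.Int.mod vl (n : Int) = vl :=
    PySem.Int.floordiv_mul_add_mod vl (n : Int)
  have hmod2 : 0 ≤ PySem.Int.mod vl (n : Int) := PySem.Int.mod_nonneg vl (by exact_mod_cast hn)
  have hmod3 : PySem.Int.mod vl (n : Int) < (n : Int) := PySem.Int.mod_lt vl (by exact_mod_cast hn)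
  -- A: the extend loop is a flatMap of replicates
  rw [PySem.List.foldl_append_eq_flatMap, List.nil_append]
  have hrep : values.flatMap (fun v => PySem.List.pyRepeat [v] seg)
      = (List.range (n * seg.toNat)).map (fun i => values.getD (i / seg.toNat) 0) := by
    calc values.flatMap (fun v => PySem.List.pyRepeat [v] seg)
        = values.flatMap (fun v => List.replicate seg.toNat v) := by
          simp only [PySem.List.pyRepeat_singleton]
      _ = _ := pv_flatMap_replicate seg.toNat values
  rw [hrep, PySem.List.pyRepeat_singleton]
  rcases lt_or_ge vl 0 with hvl | hvl
  · -- vl < 0: seg < 0, both sides are empty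
    have hsegneg : seg < 0 := by
      by_contra h
      have h' : 0 ≤ seg := Int.not_lt.mp h
      have : 0 ≤ seg * (n : Int) := mul_nonneg h' (by positivity)
      omega
    have hk0 : seg.toNat = 0 := Int.toNat_of_nonpos (le_of_lt hsegneg)
    have hB : PySem.List.pyRange 0 (vl + 1) = [] := by
      have hstop : ¬ ((0:Int) < vl + 1) := by omega
      simp [PySem.List.pyRange, hstop]
    rw [hB, hk0]
    simp only [Nat.mul_zero, List.range_zero, List.map_nil, List.length_nil, List.nil_append,
      Nat.cast_zero, sub_zero]
    rw [show (vl + 1).toNat = 0 from by omega]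
    simp
  · -- vl ≥ 0
    have hsegpos : 0 ≤ seg := by
      by_contra h
      have h1 : seg ≤ -1 := by omega
      have : seg * (n : Int) ≤ (-1) * (n : Int) :=
        mul_le_mul_of_nonneg_right h1 (by positivity)
      omega
    set k : Nat := seg.toNat with hkdef
    have hks : (k : Int) = seg := Int.toNat_of_nonneg hsegpos
    have hcov : ((n : Int)) * seg = ((n * k : Nat) : Int) := by
      push_cast [hks]; ring
    have hnk_le : ((n * k : Nat) : Int) ≤ vl := by
      rw [← hcov]
      calc (n : Int) * seg = seg * (n : Int) := by ring
        _ ≤ vl := by omega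
    set r : Nat := (vl - ((n * k : Nat) : Int) + 1).toNat with hrdef
    have hr : ((r : Nat) : Int) = vl - ((n * k : Nat) : Int) + 1 := by
      rw [hrdef]; exact Int.toNat_of_nonneg (by omega)
    -- B: pyRange 0 (vl+1) over positions, split at n*k
    have hvln : (vl + 1).toNat = n * k + r := by omega
    have hrange : PySem.List.pyRange 0 (vl + 1)
        = List.map (fun j : Nat => (j : Int)) (List.range ((vl + 1).toNat)) := by
      have h := PySem.List.pyRange_zero_natCast ((vl + 1).toNat)
      rw [show (((vl + 1).toNat : Nat) : Int) = vl + 1 from by omega] at h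
      exact h
    rw [hrange, List.map_map, hvln, List.range_add, List.map_append, List.map_map]
    congr 1
    · -- covered part
      apply List.map_congr_left
      intro i hi
      have hilt : i < n * k := List.mem_range.mp hi
      have hcond : ((i : Nat) : Int) < (n : Int) * seg := by
        rw [hcov]; exact_mod_cast hilt
      simp only [Function.comp_apply, if_pos hcond]
      rw [← hks, PySem.Int.floordiv_natCast, PySem.List.pyGetD_natCast]
    · -- tail part
      rw [show (vl - ((List.range (n * k)).map
            (fun i => values.getD (i / k) 0)).length + 1).toNat = r from by
          simp only [List.length_map, List.length_range]; omega]
      symm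
      calc _ = (List.range r).map (fun _ => PySem.List.pyGetD values (-1) 0) := by
            apply List.map_congr_left
            intro j hj
            simp only [Function.comp_apply]
            rw [if_neg (by rw [hcov]; push_cast; omega)]
        _ = List.replicate r (PySem.List.pyGetD values (-1) 0) := pv_map_range_const _ _
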